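-- pv_equiv track=rewrite | github.com/fRomke/rummi | algo2.py | determinePossibleRuns
-- ===== SOURCE A (Python) =====
-- minimal_size = "minimal_size"
--
-- def determinePossibleRuns(cfg, remaining_hand, run_size): #456
--     # TODO Merge with the group version
--     # TODO Variable 5, bugged for remaininghand = 6 or 7
--     options = []
--     if (remaining_hand-run_size) >= cfg[minimal_size]:
--         options.append(run_size)
--         if (run_size == 5):
--             return options
--         options += determinePossibleRuns(cfg, remaining_hand, run_size+1)
--     elif run_size <= 5:
--         options.append(remaining_hand)
--     return options
-- ===== SOURCE B (Python) =====
-- minimal_size = "minimal_size"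
--
-- def determinePossibleRuns(cfg, remaining_hand, run_size):
--     # Closed form: the run sizes form a contiguous range, no recursion needed.
--     hi = remaining_hand - cfg[minimal_size]
--     if run_size > hi:
--         return [remaining_hand] if run_size <= 5 else []
--     if run_size <= 5:
--         if hi >= 5:
--             return list(range(run_size, 6))
--         return list(range(run_size, hi + 1)) + [remaining_hand]
--     return list(range(run_size, hi + 1))
-- ===== Notes on version B (the rewrite author's own statement) =====
-- stated objective: simpler
-- what changed: Replaces the unary recursion (one call per candidate size) by a closed-form case analysis that emits the whole contiguous range of run sizes with list(range(...)) at once.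
import Mathlib
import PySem

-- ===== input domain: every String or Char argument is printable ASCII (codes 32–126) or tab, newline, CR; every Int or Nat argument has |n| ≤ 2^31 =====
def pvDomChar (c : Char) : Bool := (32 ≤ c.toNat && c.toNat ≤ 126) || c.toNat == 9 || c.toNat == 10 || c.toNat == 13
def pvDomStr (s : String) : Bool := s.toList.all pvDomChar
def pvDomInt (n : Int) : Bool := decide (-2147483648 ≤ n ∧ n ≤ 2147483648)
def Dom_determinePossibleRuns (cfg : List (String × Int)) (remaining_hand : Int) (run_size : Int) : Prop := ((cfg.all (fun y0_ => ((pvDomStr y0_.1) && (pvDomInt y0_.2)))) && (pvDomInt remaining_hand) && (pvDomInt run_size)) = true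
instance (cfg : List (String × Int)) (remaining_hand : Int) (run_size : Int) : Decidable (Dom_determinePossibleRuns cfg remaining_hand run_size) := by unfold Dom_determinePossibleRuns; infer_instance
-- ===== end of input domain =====

-- B replaces A's unary recursion by a closed-form case analysis emitting the whole contiguous range at once (objective: simpler).

-- ===== PORT A =====
-- literal port of A's recursion; cfg[minimal_size] raising KeyError is the `none` branch, excluded by Pre_
def determinePossibleRuns (cfg : List (String × Int)) (remaining_hand : Int) (run_size : Int) : List Int :=
  match h : (PySem.Dict.mk cfg).get? "minimal_size" with
  | none => []  -- Python raises KeyError here; outside Pre_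
  | some m =>
    if m ≤ remaining_hand - run_size then
      if run_size == 5 then [run_size]
      else run_size :: determinePossibleRuns cfg remaining_hand (run_size + 1)
    else if run_size ≤ 5 then [remaining_hand]
    else []
termination_by (remaining_hand - ((PySem.Dict.mk cfg).get? "minimal_size").getD 0 - run_size + 1).toNat
decreasing_by simp [h]; omega

-- ===== PORT B =====
def determinePossibleRuns_alt (cfg : List (String × Int)) (remaining_hand : Int) (run_size : Int) : List Int :=
  let hi := remaining_hand - ((PySem.Dict.mk cfg).get? "minimal_size").getD 0
  if hi < run_size then
    if run_size ≤ 5 then [remaining_hand] else []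
  else if run_size ≤ 5 then
    if 5 ≤ hi then PySem.List.pyRange run_size 6 1
    else PySem.List.pyRange run_size (hi + 1) 1 ++ [remaining_hand]
  else PySem.List.pyRange run_size (hi + 1) 1

-- ===== PRECONDITION & SPEC =====
-- Pre_ excludes exactly the inputs where cfg has no "minimal_size" key, on which Python A raises KeyError.
def Pre_determinePossibleRuns (cfg : List (String × Int)) (remaining_hand : Int) (run_size : Int) : Prop :=
  ((PySem.Dict.mk cfg).get? "minimal_size").isSome = true
instance (cfg : List (String × Int)) (remaining_hand : Int) (run_size : Int) : Decidable (Pre_determinePossibleRuns cfg remaining_hand run_size) := by unfold Pre_determinePossibleRuns; infer_instance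
def pvWitness_determinePossibleRuns : (List (String × Int)) × Int × Int := ([("minimal_size", 3)], 10, 3)

def Spec_determinePossibleRuns (cfg : List (String × Int)) (remaining_hand : Int) (run_size : Int) (out : List Int) : Prop := out = determinePossibleRuns_alt cfg remaining_hand run_size
instance (cfg : List (String × Int)) (remaining_hand : Int) (run_size : Int) (out : List Int) : Decidable (Spec_determinePossibleRuns cfg remaining_hand run_size out) := by unfold Spec_determinePossibleRuns; infer_instance

-- ===== CLAIM (what is proved, stated in full; the proofs are below) =====
def Claim_equal_determinePossibleRuns : Prop := ∀ (cfg : List (String × Int)) (remaining_hand : Int) (run_size : Int), Dom_determinePossibleRuns cfg remaining_hand run_size → Pre_determinePossibleRuns cfg remaining_hand run_size → Spec_determinePossibleRuns cfg remaining_hand run_size (determinePossibleRuns cfg remaining_hand run_size)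

-- ===== LEMMAS AND PROOFS =====

lemma pvAeqB (cfg : List (String × Int)) (rh m : Int)
    (h : (PySem.Dict.mk cfg).get? "minimal_size" = some m) :
    ∀ (n : ℕ) (r : Int), (rh - m - r + 1).toNat ≤ n →
      determinePossibleRuns cfg rh r = determinePossibleRuns_alt cfg rh r := by
  intro n
  induction n with
  | zero =>
    intro r hn
    rw [determinePossibleRuns]
    split
    · next h' => rw [h] at h'; cases h'
    · next m' h' =>
      rw [h] at h'; injection h' with h'; subst h'
      have : ¬ m ≤ rh - r := by omega
      simp only [determinePossibleRuns_alt, h, Option.getD_some, this, if_false]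
      split_ifs with h1 h2 h3 <;> first | rfl | omega
  | succ n ih =>
    intro r hn
    rw [determinePossibleRuns]
    split
    · next h' => rw [h] at h'; cases h'
    · next m' h' =>
      rw [h] at h'; injection h' with h'; subst h'
      by_cases hle : m ≤ rh - r
      · rw [if_pos hle]
        by_cases h5 : r = 5
        · subst h5
          rw [if_pos (show ((5:Int) == 5) = true from rfl)]
          simp only [determinePossibleRuns_alt, h, Option.getD_some]
          rw [if_neg (show ¬ rh - m < 5 by omega), if_pos (show (5:Int) ≤ 5 by omega),
            if_pos (show (5:Int) ≤ rh - m by omega)]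
          rw [PySem.List.pyRange_one_cons (by omega), PySem.List.pyRange_one_eq_nil (by omega)]
        · rw [if_neg (by simpa using h5)]
          rw [ih (r + 1) (by omega)]
          simp only [determinePossibleRuns_alt, h, Option.getD_some]
          by_cases hgt : 5 < r
          · simp only [if_neg (show ¬ r ≤ 5 by omega), if_neg (show ¬ r + 1 ≤ 5 by omega),
              if_neg (show ¬ rh - m < r by omega)]
            by_cases hend : rh - m < r + 1
            · simp only [if_pos hend]
              rw [PySem.List.pyRange_one_cons (by omega), PySem.List.pyRange_one_eq_nil (by omega)]
            · simp only [if_neg hend]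
              rw [PySem.List.pyRange_one_cons (show r < rh - m + 1 by omega)]
          · simp only [if_pos (show r ≤ 5 by omega), if_neg (show ¬ rh - m < r by omega)]
            by_cases hend : rh - m < r + 1
            · simp only [if_pos hend, if_pos (show r + 1 ≤ 5 by omega),
                if_neg (show ¬ 5 ≤ rh - m by omega)]
              rw [PySem.List.pyRange_one_cons (by omega), PySem.List.pyRange_one_eq_nil (by omega)]
              simp
            · simp only [if_neg hend, if_pos (show r + 1 ≤ 5 by omega)]
              by_cases hbig : 5 ≤ rh - m
              · simp only [if_pos hbig]
                rw [PySem.List.pyRange_one_cons (show r < 6 by omega)]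
              · simp only [if_neg hbig]
                rw [PySem.List.pyRange_one_cons (show r < rh - m + 1 by omega)]
                simp
      · rw [if_neg hle]
        simp only [determinePossibleRuns_alt, h, Option.getD_some]
        rw [show (if rh - m < r then (if r ≤ 5 then [rh] else ([]:List Int)) else if r ≤ 5 then if 5 ≤ rh - m then PySem.List.pyRange r 6 1 else PySem.List.pyRange r (rh - m + 1) 1 ++ [rh] else PySem.List.pyRange r (rh - m + 1) 1) = (if r ≤ 5 then [rh] else []) from if_pos (by omega)]

-- ===== VERDICT (by name: the statement is the Claim_ definition above) =====
theorem determinePossibleRuns_spec : Claim_equal_determinePossibleRuns := by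
  intro cfg rh r _ hpre
  unfold Spec_determinePossibleRuns
  unfold Pre_determinePossibleRuns at hpre
  obtain ⟨m, hm⟩ := Option.isSome_iff_exists.mp hpre
  exact pvAeqB cfg rh m hm _ r le_rfl
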